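-- pv_equiv track=rewrite | github.com/rsscml/sc_ppt_summarizer | glossary.py | render_glossary_for_prompt
-- ===== SOURCE A (Python) =====
-- def render_glossary_for_prompt(glossary_entries: dict, max_chars: int = 8000) -> str:
--     """
--     Render the glossary entries as a compact reference block for LLM system prompts.
--     Groups by category for readability. Truncates if it would exceed max_chars.
--     """
--     if not glossary_entries:
--         return ""
--
--     # Group by category
--     by_category: dict[str, list[tuple[str, str]]] = {}
--     for abbr, info in sorted(glossary_entries.items()):
--         cat = info.get("category", "general")
--         by_category.setdefault(cat, []).append((abbr, info["meaning"]))
--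
--     lines = []
--     lines.append("COMPANY GLOSSARY — Use this reference to correctly interpret abbreviations, "
--                  "location codes, business entities, and domain-specific terms found in the presentation. "
--                  "When you encounter any of these abbreviations, always use or mention the full meaning "
--                  "in your output alongside the abbreviation on first use.")
--     lines.append("")
--
--     for cat in sorted(by_category.keys()):
--         items = by_category[cat]
--         lines.append(f"[{cat.upper()}]")
--         for abbr, meaning in items:
--             lines.append(f"  {abbr} = {meaning}")
--         lines.append("")
--
--     text = "\n".join(lines)
--
--     # Truncate if too long (keep the instruction header)
--     if len(text) > max_chars:
--         header_end = text.index("\n\n") + 2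
--         text = text[:max_chars - 50] + "\n  ... [glossary truncated for token budget]"
--
--     return text
-- ===== SOURCE B (Python) =====
-- HEADER = ("COMPANY GLOSSARY — Use this reference to correctly interpret abbreviations, "
--           "location codes, business entities, and domain-specific terms found in the presentation. "
--           "When you encounter any of these abbreviations, always use or mention the full meaning "
--           "in your output alongside the abbreviation on first use.")
--
-- TRUNC = "\n  ... [glossary truncated for token budget]"
--
--
-- def render_glossary_for_prompt(glossary_entries: dict, max_chars: int = 8000) -> str:
--     if not glossary_entries:
--         return ""
--     # One composite sort by (category, abbr), then a single groupby-style walk: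
--     # emit a header whenever the category changes.  No grouping dict, no second sort.
--     triples = sorted((info.get("category", "general"), abbr, info["meaning"])
--                      for abbr, info in glossary_entries.items())
--     out = [HEADER, ""]
--     prev = None
--     for cat, abbr, meaning in triples:
--         if cat != prev:
--             if prev is not None:
--                 out.append("")
--             out.append("[" + cat.upper() + "]")
--             prev = cat
--         out.append("  " + abbr + " = " + meaning)
--     out.append("")
--     text = "\n".join(out)
--     return text if len(text) <= max_chars else text[:max_chars - 50] + TRUNC
-- ===== Notes on version B (the rewrite author's own statement) =====
-- stated objective: alternative
-- what changed: A's dict-of-lists grouping (global sort by abbr, setdefault/append per entry, then a sort of the category keys with a lookup loop) is replaced by one composite sort of flat (category, abbr, meaning) triples followed by a single groupby-style walk that emits a header whenever the category changes - no grouping dict and no second sort.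
import Mathlib
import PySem

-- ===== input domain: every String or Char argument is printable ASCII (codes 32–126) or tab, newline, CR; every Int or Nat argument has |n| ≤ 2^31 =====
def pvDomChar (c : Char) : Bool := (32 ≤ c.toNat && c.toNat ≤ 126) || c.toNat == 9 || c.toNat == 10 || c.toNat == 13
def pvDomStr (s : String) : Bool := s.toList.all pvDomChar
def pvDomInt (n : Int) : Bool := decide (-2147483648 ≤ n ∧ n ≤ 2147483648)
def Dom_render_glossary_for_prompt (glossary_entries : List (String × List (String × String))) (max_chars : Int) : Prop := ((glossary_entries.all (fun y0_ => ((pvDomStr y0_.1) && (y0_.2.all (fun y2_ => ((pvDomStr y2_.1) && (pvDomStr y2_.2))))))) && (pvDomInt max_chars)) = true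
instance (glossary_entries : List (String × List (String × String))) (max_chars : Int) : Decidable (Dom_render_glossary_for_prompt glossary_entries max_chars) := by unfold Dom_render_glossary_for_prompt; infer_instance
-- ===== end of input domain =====

-- B replaces A's dict-of-lists grouping (global sort by abbr, setdefault/append, then a sort of the
-- category keys with a lookup loop) by ONE composite sort of flat (category, abbr, meaning) triples
-- followed by a single groupby-style walk that emits a header whenever the category changes
-- (objective: alternative, no speed claim).

-- shared module-level context of Source A and Source B: the literal instruction header
def pvHeader : String := "COMPANY GLOSSARY — Use this reference to correctly interpret abbreviations, location codes, business entities, and domain-specific terms found in the presentation. When you encounter any of these abbreviations, always use or mention the full meaning in your output alongside the abbreviation on first use."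

def pvTruncMark : String := "\n  ... [glossary truncated for token budget]"

-- info.get("category", "general")  (info is a Python dict, here its assoc list)
def pvCat (info : List (String × String)) : String := PySem.Dict.getD (PySem.Dict.mk info) "category" "general"
-- info["meaning"]: Python raises KeyError when the key is absent; Pre_ excludes that, so the
-- default "" below is never reached on admitted inputs
def pvMeaning (info : List (String × String)) : String := PySem.Dict.getD (PySem.Dict.mk info) "meaning" ""

-- ===== PORT A =====
-- sorted(glossary_entries.items()) compares (str, dict) tuples; a dict's keys are distinct
-- (Pre_: Nodup), so the dict components are never compared and it is a sort by the key string.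
-- by_category.setdefault(cat, []).append(x) is Dict.modify cat [] (· ++ [x]).
def pvByCat (glossary_entries : List (String × List (String × String))) : PySem.Dict String (List (String × String)) :=
  (PySem.List.sorted glossary_entries (fun p => p.1) false).foldl
    (fun d p => d.modify (pvCat p.2) [] (fun xs => xs ++ [(p.1, pvMeaning p.2)]))
    PySem.Dict.empty

-- Source A also computes header_end = text.index("\n\n") + 2 but never uses it — with a nonempty
-- glossary "\n\n" is always present (lines[1] = "" and a category block follows) — so it is not ported.
def render_glossary_for_prompt (glossary_entries : List (String × List (String × String))) (max_chars : Int) : String :=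
  if glossary_entries = [] then "" else
  let by_category := pvByCat glossary_entries
  let lines : List String :=
    (PySem.List.sorted by_category.keys (fun c => c) false).foldl
      (fun ls cat =>
        (ls ++ ["[" ++ PySem.Str.upper cat ++ "]"]
            ++ (by_category.getD cat []).map (fun q => "  " ++ q.1 ++ " = " ++ q.2)) ++ [""])
      [pvHeader, ""]
  let text := PySem.Str.join "\n" lines
  if max_chars < PySem.Str.len text then
    PySem.Str.slice text none (some (max_chars - 50)) ++ pvTruncMark
  else text

-- ===== PORT B =====
-- triples = sorted((info.get("category","general"), abbr, info["meaning"]) for abbr, info in items()).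
-- Python sorts the 3-tuples lexicographically; under Pre_ (distinct abbrs) the third component is
-- never compared, so the two-key sorted2 (category, then abbr) is exact on every admitted input.
def pvTriples (glossary_entries : List (String × List (String × String))) : List (String × String × String) :=
  glossary_entries.map (fun p => (pvCat p.2, p.1, pvMeaning p.2))

-- the body of Source B's single for-loop: state = (out, prev)
def pvStep (s : List String × Option String) (t : String × String × String) : List String × Option String :=
  if some t.1 ≠ s.2 then
    (((match s.2 with | none => s.1 | some _ => s.1 ++ [""]) ++ ["[" ++ PySem.Str.upper t.1 ++ "]"])
       ++ ["  " ++ t.2.1 ++ " = " ++ t.2.2], some t.1)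
  else (s.1 ++ ["  " ++ t.2.1 ++ " = " ++ t.2.2], s.2)

def render_glossary_for_prompt_alt (glossary_entries : List (String × List (String × String))) (max_chars : Int) : String :=
  if glossary_entries.isEmpty then "" else
  let triples := PySem.List.sorted2 (pvTriples glossary_entries) (fun t => t.1) (fun t => t.2.1) false
  let s := triples.foldl pvStep ([pvHeader, ""], none)
  let text := PySem.Str.join "\n" (s.1 ++ [""])
  if PySem.Str.len text ≤ max_chars then text
  else PySem.Str.slice text none (some (max_chars - 50)) ++ pvTruncMark

-- ===== PRECONDITION & SPEC =====
-- Pre_ excludes (a) inputs where some info dict lacks the "meaning" key — there Python A raises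
-- KeyError — and (b) assoc lists with duplicate keys (outer or inner), which cannot arise from a
-- Python dict and whose list encoding is ambiguous (a Python dict literal silently keeps only the
-- last duplicate, a defensible corner neither program specifies).
def Pre_render_glossary_for_prompt (glossary_entries : List (String × List (String × String))) (max_chars : Int) : Prop :=
  (glossary_entries.map (fun p => p.1)).Nodup ∧
  ∀ p ∈ glossary_entries,
    (p.2.map (fun q => q.1)).Nodup ∧ "meaning" ∈ p.2.map (fun q => q.1)
instance (glossary_entries : List (String × List (String × String))) (max_chars : Int) : Decidable (Pre_render_glossary_for_prompt glossary_entries max_chars) := by unfold Pre_render_glossary_for_prompt; infer_instance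

def pvWitness_render_glossary_for_prompt : (List (String × List (String × String))) × Int :=
  ([("AI", [("meaning", "artificial intelligence"), ("category", "tech")]),
    ("HQ", [("meaning", "headquarters")])], 8000)

def Spec_render_glossary_for_prompt (glossary_entries : List (String × List (String × String))) (max_chars : Int) (out : String) : Prop := out = render_glossary_for_prompt_alt glossary_entries max_chars
instance (glossary_entries : List (String × List (String × String))) (max_chars : Int) (out : String) : Decidable (Spec_render_glossary_for_prompt glossary_entries max_chars out) := by unfold Spec_render_glossary_for_prompt; infer_instance

-- ===== CLAIM (what is proved, stated in full; the proofs are below) =====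
def Claim_equal_render_glossary_for_prompt : Prop := ∀ (glossary_entries : List (String × List (String × String))) (max_chars : Int), Dom_render_glossary_for_prompt glossary_entries max_chars → Pre_render_glossary_for_prompt glossary_entries max_chars → Spec_render_glossary_for_prompt glossary_entries max_chars (render_glossary_for_prompt glossary_entries max_chars)

-- ===== LEMMAS AND PROOFS =====
-- (everything below is proof-only scaffolding)

-- abbreviations used by the proofs
def pvS1 (g : List (String × List (String × String))) : List (String × List (String × String)) :=
  PySem.List.sorted g (fun p => p.1) false
def pvL (g : List (String × List (String × String))) : List (String × String × String) :=
  pvTriples (pvS1 g)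
def pvCats (g : List (String × List (String × String))) : List String :=
  PySem.List.sorted (PySem.Set.ofList ((pvL g).map (fun t => t.1))) (fun c => c) false
def pvItems (g : List (String × List (String × String))) (c : String) : List (String × String) :=
  (((pvL g).filter (fun t => t.1 == c)).map (fun t => t.2))
def pvLine (q : String × String) : String := "  " ++ q.1 ++ " = " ++ q.2
def pvBlockA (g : List (String × List (String × String))) (c : String) : List String :=
  ["[" ++ PySem.Str.upper c ++ "]"] ++ (pvItems g c).map pvLine
-- the lex key of Source B's composite sort
def pvKey (t : String × String × String) : Lex (String × String) := toLex (t.1, t.2.1)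

-- Source B's sorted list of triples, named as a flatMap of per-category blocks
def pvC (g : List (String × List (String × String))) : List (String × String × String) :=
  (pvCats g).flatMap (fun c => (pvItems g c).map (fun q => (c, q.1, q.2)))

-- sorted2 with keys (k1, k2) is the insertion sort by the lex key
theorem pv_sorted2_eq_sorted_lex (xs : List (String × String × String)) :
    PySem.List.sorted2 xs (fun t => t.1) (fun t => t.2.1) false
      = PySem.List.sorted xs pvKey false := by
  rw [PySem.List.sorted_eq_foldl_insertBy]
  unfold PySem.List.sorted2 pvKey
  simp only [if_neg (by decide : ¬ (false = true))]
  congr 1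
  funext acc x
  congr 1
  funext a b
  rcases lt_trichotomy a.1 b.1 with h | h | h
  · simp [h, Prod.Lex.toLex_lt_toLex, not_lt_of_gt h]
  · simp [h, Prod.Lex.toLex_lt_toLex]
  · have hne : ¬ (a.1 = b.1) := fun he => absurd (he ▸ h) (lt_irrefl _)
    simp [not_lt_of_gt h, h, hne, Prod.Lex.toLex_lt_toLex]

-- A's grouping dict, looked up anywhere: the items of category c, in sorted-by-abbr order
theorem pv_getD_byCat (g : List (String × List (String × String))) (c : String) :
    (pvByCat g).getD c [] =
      ((pvS1 g).filter (fun p => pvCat p.2 == c)).map (fun p => (p.1, pvMeaning p.2)) := by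
  unfold pvByCat pvS1
  rw [show (PySem.List.sorted g (fun p => p.1) false).foldl
        (fun d p => d.modify (pvCat p.2) [] (fun xs => xs ++ [(p.1, pvMeaning p.2)]))
        PySem.Dict.empty
      = ((PySem.List.sorted g (fun p => p.1) false).map
          (fun p => (pvCat p.2, (p.1, pvMeaning p.2)))).foldl
          (fun d q => d.modify q.1 [] (fun xs => xs ++ [q.2])) PySem.Dict.empty
      from (List.foldl_map (f := fun (p : String × List (String × String)) => (pvCat p.2, (p.1, pvMeaning p.2)))
          (g := fun (d : PySem.Dict String (List (String × String))) (q : String × String × String) => d.modify q.1 [] (fun xs => xs ++ [q.2]))).symm]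
  rw [PySem.Dict.getD_foldl_modify_append]
  simp [PySem.Dict.getD_empty, List.filter_map, Function.comp_def]

-- items via the triple list: the same list
theorem pv_items_eq_filter (g : List (String × List (String × String))) (c : String) :
    pvItems g c = ((pvS1 g).filter (fun p => pvCat p.2 == c)).map (fun p => (p.1, pvMeaning p.2)) := by
  unfold pvItems pvL pvTriples
  rw [List.filter_map, List.map_map]
  rfl

-- each block of pvC is a filter of the triple list
theorem pv_block_eq_filter (g : List (String × List (String × String))) (c : String) :
    (pvItems g c).map (fun q => (c, q.1, q.2)) = (pvL g).filter (fun t => t.1 == c) := by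
  unfold pvItems
  rw [List.map_map]
  have : ∀ t ∈ (pvL g).filter (fun t => t.1 == c),
      ((fun q => (c, q.1, q.2)) ∘ (fun t : String × String × String => t.2)) t = id t := by
    intro t ht
    have := (List.mem_filter.mp ht).2
    have h1 : t.1 = c := by simpa using this
    simp [Function.comp, ← h1]
  rw [List.map_congr_left this, List.map_id]

-- A's grouping dict's keys, sorted: pvCats
theorem pv_sorted_keys_byCat (g : List (String × List (String × String))) :
    PySem.List.sorted (pvByCat g).keys (fun c => c) false = pvCats g := by
  unfold pvByCat pvCats pvL pvTriples pvS1
  rw [PySem.Dict.keys_foldl_modify_key]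
  simp [PySem.Dict.keys_empty, PySem.Set.update_nil_left, List.map_map, Function.comp_def]

-- a flatMap of per-key filters over the distinct keys is a permutation of the list
theorem pv_flatMap_filter_perm :
    ∀ (cs : List String) (L : List (String × String × String)), cs.Nodup →
      (∀ t ∈ L, t.1 ∈ cs) →
      (cs.flatMap (fun c => L.filter (fun t => t.1 == c))).Perm L := by
  intro cs
  induction cs with
  | nil =>
    intro L _ hcov
    have : L = [] := List.eq_nil_iff_forall_not_mem.mpr (fun t ht => by simpa using hcov t ht)
    simp [this]
  | cons c cs ih =>
    intro L hnd hcov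
    have hcnotin : c ∉ cs := (List.nodup_cons.mp hnd).1
    have hndcs : cs.Nodup := (List.nodup_cons.mp hnd).2
    set L' := L.filter (fun t => !(t.1 == c)) with hL'
    have hcong : ∀ c' ∈ cs, L.filter (fun t => t.1 == c') = L'.filter (fun t => t.1 == c') := by
      intro c' hc'
      have hcc : c ≠ c' := fun he => hcnotin (he ▸ hc')
      rw [hL', List.filter_filter]
      apply List.filter_congr
      intro t _
      by_cases ht : t.1 = c'
      · simp [ht, Ne.symm hcc]
      · simp [ht]
    have hflat : cs.flatMap (fun c' => L.filter (fun t => t.1 == c'))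
        = cs.flatMap (fun c' => L'.filter (fun t => t.1 == c')) := List.flatMap_congr hcong
    have hcov' : ∀ t ∈ L', t.1 ∈ cs := by
      intro t ht
      have hm := List.mem_filter.mp ht
      have h1 : t.1 ≠ c := by simpa using hm.2
      rcases List.mem_cons.mp (hcov t hm.1) with h | h
      · exact absurd h h1
      · exact h
    rw [List.flatMap_cons, hflat]
    exact ((ih L' hndcs hcov').append_left _).trans (List.filter_append_perm _ L)

-- pairwise over a flatMap, from pairwise blocks and pairwise-related blocks
theorem pv_pairwise_flatMap {α β : Type} (R : α → α → Prop) (f : β → List α) :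
    ∀ (cs : List β), cs.Pairwise (fun a b => ∀ x ∈ f a, ∀ y ∈ f b, R x y) →
      (∀ c ∈ cs, (f c).Pairwise R) → (cs.flatMap f).Pairwise R := by
  intro cs
  induction cs with
  | nil => intro _ _; simp
  | cons c cs ih =>
    intro hp hb
    rw [List.flatMap_cons, List.pairwise_append]
    refine ⟨hb c (by simp), ih (List.pairwise_cons.mp hp).2 (fun d hd => hb d (by simp [hd])), ?_⟩
    intro x hx y hy
    rcases List.mem_flatMap.mp hy with ⟨d, hd, hyd⟩
    exact (List.pairwise_cons.mp hp).1 d hd x hx y hyd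

-- the abbreviations along pvS1 strictly increase (distinct keys)
theorem pv_S1_pairwise_lt (g : List (String × List (String × String)))
    (hnd : (g.map (fun p => p.1)).Nodup) :
    (pvS1 g).Pairwise (fun a b => a.1 < b.1) := by
  have hle : (pvS1 g).Pairwise (fun a b => a.1 ≤ b.1) :=
    PySem.List.sorted_pairwise g (fun p => p.1)
  have hndS : ((pvS1 g).map (fun p => p.1)).Nodup :=
    (((PySem.List.sorted_perm g (fun p => p.1) false).map (fun p => p.1)).nodup_iff).mpr hnd
  have hne : (pvS1 g).Pairwise (fun a b => a.1 ≠ b.1) := List.pairwise_map.mp hndS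
  exact (hle.and hne).imp (fun h => lt_of_le_of_ne h.1 h.2)

-- Source B's composite sort, named: the blocks of A's categories in A's order
theorem pv_sorted2_eq_pvC (g : List (String × List (String × String)))
    (hnd : (g.map (fun p => p.1)).Nodup) :
    PySem.List.sorted2 (pvTriples g) (fun t => t.1) (fun t => t.2.1) false = pvC g := by
  rw [pv_sorted2_eq_sorted_lex]
  apply PySem.List.sorted_eq_of_perm_of_pairwise_lt
  · -- pvC g is a permutation of the triples
    have h1 : (pvC g).Perm (pvL g) := by
      unfold pvC
      rw [List.flatMap_congr (fun c _ => pv_block_eq_filter g c)]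
      apply pv_flatMap_filter_perm
      · exact (PySem.List.sorted_perm _ _ _).nodup_iff.mpr (PySem.Set.nodup_ofList _)
      · intro t ht
        unfold pvCats
        rw [PySem.List.mem_sorted, PySem.Set.mem_ofList]
        exact List.mem_map.mpr ⟨t, ht, rfl⟩
    have h2 : (pvL g).Perm (pvTriples g) := by
      unfold pvL pvTriples pvS1
      exact (PySem.List.sorted_perm g (fun p => p.1) false).map _
    exact h1.trans h2
  · -- pvC g is strictly increasing in the lex key
    apply pv_pairwise_flatMap
    · -- across blocks: categories strictly increase
      have hcats : (pvCats g).Pairwise (· < ·) := by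
        unfold pvCats
        exact PySem.List.sorted_ofList_pairwise_lt _
      refine hcats.imp_of_mem ?_
      intro a b _ _ hab x hx y hy
      rcases List.mem_map.mp hx with ⟨q, _, rfl⟩
      rcases List.mem_map.mp hy with ⟨r, _, rfl⟩
      unfold pvKey
      rw [Prod.Lex.toLex_lt_toLex]
      exact Or.inl hab
    · -- within a block: same category, abbreviations strictly increase
      intro c _
      rw [List.pairwise_map]
      have : (pvItems g c).Pairwise (fun a b => a.1 < b.1) := by
        rw [pv_items_eq_filter, List.pairwise_map]
        exact (pv_S1_pairwise_lt g hnd).filter _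
      refine this.imp ?_
      intro a b hab
      unfold pvKey
      rw [Prod.Lex.toLex_lt_toLex]
      exact Or.inr ⟨rfl, hab⟩

-- walking the tail of a block whose category equals prev just appends the item lines
theorem pv_walk_const (c : String) :
    ∀ (qs : List (String × String)) (acc : List String),
      (qs.map (fun q => (c, q.1, q.2))).foldl pvStep (acc, some c)
        = (acc ++ qs.map pvLine, some c) := by
  intro qs
  induction qs with
  | nil => intro acc; simp
  | cons q qs ih =>
    intro acc
    simp only [List.map_cons, List.foldl_cons]
    rw [show pvStep (acc, some c) (c, q.1, q.2) = (acc ++ [pvLine q], some c) from by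
      unfold pvStep pvLine; simp]
    rw [ih, List.append_assoc]
    rfl

-- walking one whole block from a different previous category
theorem pv_walk_block (c : String) (q : String × String) (qs : List (String × String))
    (acc : List String) (p : Option String) (hne : some c ≠ p) :
    (((q :: qs).map (fun q => (c, q.1, q.2))).foldl pvStep (acc, p))
      = (((match p with | none => acc | some _ => acc ++ [""])
            ++ ["[" ++ PySem.Str.upper c ++ "]"]) ++ (q :: qs).map pvLine, some c) := by
  simp only [List.map_cons, List.foldl_cons]
  rw [show pvStep (acc, p) (c, q.1, q.2)
      = (((match p with | none => acc | some _ => acc ++ [""])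
            ++ ["[" ++ PySem.Str.upper c ++ "]"]) ++ [pvLine q], some c) from by
    unfold pvStep pvLine; rw [if_pos hne]; cases p <;> rfl]
  rw [pv_walk_const, List.append_assoc]
  rfl

-- walking a run of nonempty blocks with strictly increasing categories
theorem pv_walk_blocks (f : String → List (String × String)) :
    ∀ (cs : List String) (p : String) (acc : List String),
      (∀ c ∈ cs, p < c) → cs.Pairwise (· < ·) → (∀ c ∈ cs, f c ≠ []) →
      ((cs.flatMap (fun c => (f c).map (fun q => (c, q.1, q.2)))).foldl pvStep (acc, some p)).1
        = acc ++ cs.flatMap (fun c => [""] ++ ["[" ++ PySem.Str.upper c ++ "]"] ++ (f c).map pvLine) := by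
  intro cs
  induction cs with
  | nil => intro p acc _ _ _; simp
  | cons c cs ih =>
    intro p acc hgt hpw hnonempty
    obtain ⟨q, qs, hfc⟩ : ∃ q qs, f c = q :: qs := by
      cases hqc : f c with
      | nil => exact absurd hqc (hnonempty c (by simp))
      | cons q qs => exact ⟨q, qs, rfl⟩
    have hne : some c ≠ some p := by
      intro h
      exact absurd ((Option.some_inj.mp h) ▸ hgt c (by simp)) (lt_irrefl _)
    rw [List.flatMap_cons, List.foldl_append, hfc, pv_walk_block c q qs acc (some p) hne,
      ih c _ (fun d hd => (List.pairwise_cons.mp hpw).1 d hd)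
        (List.pairwise_cons.mp hpw).2 (fun d hd => hnonempty d (by simp [hd])),
      List.flatMap_cons, hfc]
    simp

-- every category of pvCats has a nonempty item list
theorem pv_items_nonempty (g : List (String × List (String × String))) (c : String)
    (hc : c ∈ pvCats g) : pvItems g c ≠ [] := by
  unfold pvCats at hc
  rw [PySem.List.mem_sorted, PySem.Set.mem_ofList] at hc
  rcases List.mem_map.mp hc with ⟨t, ht, rfl⟩
  unfold pvItems
  simp only [ne_eq, List.map_eq_nil_iff, List.filter_eq_nil_iff, not_forall]
  exact ⟨t, ht, by simp⟩

-- A's loop, named as a flatMap of blocks over the sorted categories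
theorem pv_A_lines (g : List (String × List (String × String))) :
    (PySem.List.sorted (pvByCat g).keys (fun c => c) false).foldl
      (fun ls cat =>
        (ls ++ ["[" ++ PySem.Str.upper cat ++ "]"]
            ++ ((pvByCat g).getD cat []).map (fun q => "  " ++ q.1 ++ " = " ++ q.2)) ++ [""])
      [pvHeader, ""]
    = [pvHeader, ""] ++ (pvCats g).flatMap (fun c => pvBlockA g c ++ [""]) := by
  rw [pv_sorted_keys_byCat]
  rw [PySem.List.foldl_congr_mem (pvCats g) _
      (fun ls cat => ls ++ (pvBlockA g cat ++ [""])) [pvHeader, ""]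
      (by
        intro ls cat _
        unfold pvBlockA
        rw [pv_getD_byCat, ← pv_items_eq_filter]
        simp [pvLine])]
  exact PySem.List.foldl_append_eq_flatMap _ _ _

-- moving the inter-block blank line from before each block to after it
theorem pv_shift_blank (h : String → List String) :
    ∀ (cs : List String),
      cs.flatMap (fun c => [""] ++ h c) ++ [""] = [""] ++ cs.flatMap (fun c => h c ++ [""]) := by
  intro cs
  induction cs with
  | nil => simp
  | cons c cs ih => simp [List.flatMap_cons, ← ih]

-- B's walk produces exactly A's line list
theorem pv_lines_eq (g : List (String × List (String × String)))
    (hnd : (g.map (fun p => p.1)).Nodup) (hg : g ≠ []) :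
    ((PySem.List.sorted2 (pvTriples g) (fun t => t.1) (fun t => t.2.1) false).foldl
        pvStep ([pvHeader, ""], none)).1 ++ [""]
      = [pvHeader, ""] ++ (pvCats g).flatMap (fun c => pvBlockA g c ++ [""]) := by
  rw [pv_sorted2_eq_pvC g hnd]
  have hLne : pvL g ≠ [] := by
    unfold pvL pvTriples pvS1
    simp [PySem.List.sorted_eq_nil_iff, hg]
  obtain ⟨c0, cs, hcats⟩ : ∃ c0 cs, pvCats g = c0 :: cs := by
    cases hc : pvCats g with
    | nil =>
      exfalso
      obtain ⟨t, ts, hL⟩ := List.exists_cons_of_ne_nil hLne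
      have hmem : t.1 ∈ pvCats g := by
        unfold pvCats
        rw [PySem.List.mem_sorted, PySem.Set.mem_ofList]
        exact List.mem_map.mpr ⟨t, by rw [hL]; simp, rfl⟩
      rw [hc] at hmem
      exact absurd hmem List.not_mem_nil
    | cons c0 cs => exact ⟨c0, cs, rfl⟩
  have hpw : (c0 :: cs).Pairwise (· < ·) := by
    rw [← hcats]; unfold pvCats; exact PySem.List.sorted_ofList_pairwise_lt _
  obtain ⟨q, qs, hq⟩ : ∃ q qs, pvItems g c0 = q :: qs := by
    cases hqc : pvItems g c0 with
    | nil => exact absurd hqc (pv_items_nonempty g c0 (by rw [hcats]; simp))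
    | cons q qs => exact ⟨q, qs, rfl⟩
  unfold pvC
  rw [hcats, List.flatMap_cons, List.foldl_append, hq,
    pv_walk_block c0 q qs [pvHeader, ""] none (by simp)]
  rw [pv_walk_blocks (fun c => pvItems g c) cs c0 _
      (fun d hd => (List.pairwise_cons.mp hpw).1 d hd)
      (List.pairwise_cons.mp hpw).2
      (fun d hd => pv_items_nonempty g d (by rw [hcats]; simp [hd]))]
  rw [List.flatMap_cons]
  unfold pvBlockA
  rw [hq]
  have hshift := pv_shift_blank (fun c => ["[" ++ PySem.Str.upper c ++ "]"] ++ (pvItems g c).map pvLine) cs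
  simp only [List.append_assoc] at hshift ⊢
  rw [hshift]

-- ===== VERDICT (by name: the statement is the Claim_ definition above) =====
theorem render_glossary_for_prompt_spec : Claim_equal_render_glossary_for_prompt := by
  intro g mc _hdom hpre
  unfold Spec_render_glossary_for_prompt render_glossary_for_prompt render_glossary_for_prompt_alt
  by_cases hg : g = []
  · rw [if_pos hg, if_pos (by rw [hg]; rfl)]
  · rw [if_neg hg, if_neg (fun h => hg (List.isEmpty_iff.mp h))]
    dsimp only
    have hlines := pv_lines_eq g hpre.1 hg
    have hA := pv_A_lines g
    rw [hA, ← hlines]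
    set text := PySem.Str.join "
"
      (((PySem.List.sorted2 (pvTriples g) (fun t => t.1) (fun t => t.2.1) false).foldl
          pvStep ([pvHeader, ""], none)).1 ++ [""]) with htext
    by_cases h : PySem.Str.len text ≤ mc
    · rw [if_neg (not_lt.mpr h), if_pos h]
    · rw [if_pos (not_le.mp h), if_neg h]
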